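-- pv_equiv track=rewrite | github.com/wzyjerry/inventor-link | d_co_author.py | gen_coauthor_batch
-- ===== SOURCE A (Python) =====
-- def get_name(inventor):
--     name = inventor['name'].split(',')
--     name.append(name[0])
--     return ' '.join([x.strip() for x in name[1:]])
--
-- def gen_coauthor_batch(inventor_list):
--     result = []
--     name_list = []
--     for inventor in inventor_list:
--         name_list.append(get_name(inventor))
--     size = len(name_list)
--     for i in range(size):
--         item = []
--         for j in range(size):
--             if i != j:
--                 item.append((name_list[j], 1))
--         result.append((name_list[i], tuple(item)))
--     return tuple(name_list), tuple(result)
-- ===== SOURCE B (Python) =====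
-- def get_name(inventor):
--     name = inventor['name'].split(',')
--     name.append(name[0])
--     return ' '.join([x.strip() for x in name[1:]])
--
-- def gen_coauthor_batch(inventor_list):
--     names = [get_name(inv) for inv in inventor_list]
--     before = []
--     after = [(n, 1) for n in names]
--     result = []
--     for name in names:
--         del after[0]
--         result.append((name, tuple(before + after)))
--         before.append((name, 1))
--     return tuple(names), tuple(result)
-- ===== Notes on version B (the rewrite author's own statement) =====
-- stated objective: alternative
-- what changed: Replaces A's index-based nested loops (range(size) with an i != j guard) by a single marching pass over the names that maintains two pair accumulators, a growing prefix 'before' and a shrinking suffix 'after', so each coauthor tuple is before + after with no inner j-loop, no guard and no indexing.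
import Mathlib
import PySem

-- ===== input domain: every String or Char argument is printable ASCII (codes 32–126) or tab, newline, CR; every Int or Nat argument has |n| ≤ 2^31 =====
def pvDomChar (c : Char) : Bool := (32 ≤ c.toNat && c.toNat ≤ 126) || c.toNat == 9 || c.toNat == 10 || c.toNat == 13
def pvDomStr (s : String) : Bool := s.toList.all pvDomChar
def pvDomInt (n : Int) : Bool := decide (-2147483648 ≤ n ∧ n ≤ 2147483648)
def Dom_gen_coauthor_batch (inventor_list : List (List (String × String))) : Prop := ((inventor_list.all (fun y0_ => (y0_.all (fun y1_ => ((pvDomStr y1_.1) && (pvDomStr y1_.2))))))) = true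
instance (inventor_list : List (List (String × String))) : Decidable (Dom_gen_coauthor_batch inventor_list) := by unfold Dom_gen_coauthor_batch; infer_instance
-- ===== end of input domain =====

-- B replaces A's index-based nested loops by one marching pass maintaining a growing
-- prefix and a shrinking suffix of (name, 1) pairs (objective: alternative).

-- ===== PORT A =====
-- inventor['name']: first-match lookup in the association list; Pre_ guarantees the key exists,
-- so the `getD ""` default is never reached on admitted inputs.
def pyNameVal (inventor : List (String × String)) : String :=
  ((inventor.find? (fun p => p.1 == "name")).map (·.2)).getD ""

-- get_name, shared verbatim by A and B (Source B keeps A's get_name unchanged)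
def pyGetName (s : String) : String :=
  -- s.split(','): sep is non-empty, so split? always returns some; getD [] is never the default
  let name := (PySem.Str.split? s ",").getD []
  let name := name ++ [PySem.List.pyGetD name 0 ""]
  PySem.Str.join " " ((PySem.List.slice name (some 1) none).map PySem.Str.strip)

def gen_coauthor_batch (inventor_list : List (List (String × String))) : List String × (List (String × (List (String × Int)))) :=
  let name_list := inventor_list.foldl (fun acc inventor => acc ++ [pyGetName (pyNameVal inventor)]) []
  let size := name_list.length
  let result := (List.range size).foldl (fun res (i : Nat) =>
      let item := (List.range size).foldl (fun it (j : Nat) =>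
          if i ≠ j then it ++ [(PySem.List.pyGetD name_list (j : Int) "", (1 : Int))] else it) []
      res ++ [(PySem.List.pyGetD name_list (i : Int) "", item)]) []
  (name_list, result)

-- ===== PORT B =====
-- single pass over names; state = (before, after, result); `del after[0]` = drop 1
def gen_coauthor_batch_alt (inventor_list : List (List (String × String))) : List String × (List (String × (List (String × Int)))) :=
  let names := inventor_list.map (fun inv => pyGetName (pyNameVal inv))
  let st := names.foldl
    (fun (st : List (String × Int) × List (String × Int) × List (String × (List (String × Int)))) name =>
      let after := st.2.1.drop 1
      (st.1 ++ [(name, (1 : Int))], after, st.2.2 ++ [(name, st.1 ++ after)]))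
    ([], names.map (fun n => (n, (1 : Int))), [])
  (names, st.2.2)

-- ===== PRECONDITION & SPEC =====
-- Pre_ excludes exactly the inputs where inventor['name'] raises KeyError in Python (both A and B raise there).
def Pre_gen_coauthor_batch (inventor_list : List (List (String × String))) : Prop :=
  (inventor_list.all (fun inventor => inventor.any (fun p => p.1 == "name"))) = true
instance (inventor_list : List (List (String × String))) : Decidable (Pre_gen_coauthor_batch inventor_list) := by unfold Pre_gen_coauthor_batch; infer_instance
def pvWitness_gen_coauthor_batch : (List (List (String × String))) := [[("name", "Doe, John")], [("name", "C")]]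
def Spec_gen_coauthor_batch (inventor_list : List (List (String × String))) (out : List String × (List (String × (List (String × Int))))) : Prop := out = gen_coauthor_batch_alt inventor_list
instance (inventor_list : List (List (String × String))) (out : List String × (List (String × (List (String × Int))))) : Decidable (Spec_gen_coauthor_batch inventor_list out) := by unfold Spec_gen_coauthor_batch; infer_instance

-- ===== CLAIM (what is proved, stated in full; the proofs are below) =====
def Claim_equal_gen_coauthor_batch : Prop := ∀ (inventor_list : List (List (String × String))), Dom_gen_coauthor_batch inventor_list → Pre_gen_coauthor_batch inventor_list → Spec_gen_coauthor_batch inventor_list (gen_coauthor_batch inventor_list)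

-- ===== LEMMAS AND PROOFS =====

-- recursive description of B's marching pass (proof helper only)
def buildRec : List (String × Int) → List String → List (String × List (String × Int))
  | _, [] => []
  | pre, n :: tail => (n, pre ++ tail.map (fun m => (m, (1 : Int)))) :: buildRec (pre ++ [(n, 1)]) tail

-- A's name_list loop is a map
theorem foldl_names (l : List (List (String × String))) (acc : List String) :
    l.foldl (fun acc inventor => acc ++ [pyGetName (pyNameVal inventor)]) acc
      = acc ++ l.map (fun inventor => pyGetName (pyNameVal inventor)) := by
  induction l generalizing acc with
  | nil => simp
  | cons x xs ih => simp [List.foldl_cons, ih]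

-- A's outer loop is a map
theorem foldl_outer {β : Type} (f : Nat → β) (xs : List Nat) (acc : List β) :
    xs.foldl (fun res (i : Nat) => res ++ [f i]) acc = acc ++ xs.map f := by
  induction xs generalizing acc with
  | nil => simp
  | cons x xs ih => simp [List.foldl_cons, ih]

-- A's inner guarded loop is a filter-then-map
theorem foldl_inner {β : Type} (i : Nat) (f : Nat → β) (xs : List Nat) (acc : List β) :
    xs.foldl (fun it (j : Nat) => if i ≠ j then it ++ [f j] else it) acc
      = acc ++ (xs.filter (fun j => j != i)).map f := by
  induction xs generalizing acc with
  | nil => simp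
  | cons x xs ih =>
    rw [List.foldl_cons, ih]
    by_cases h : i = x
    · subst h; simp
    · simp [h, Ne.symm h]

-- range n with index i removed splits as the two outer segments
theorem range_filter_ne (n i : Nat) (hi : i < n) :
    (List.range n).filter (fun j => j != i)
      = List.range i ++ (List.range (n - i - 1)).map (fun k => i + 1 + k) := by
  obtain ⟨m, rfl⟩ : ∃ m, n = i + 1 + m := ⟨n - i - 1, by omega⟩
  rw [show i + 1 + m - i - 1 = m by omega, List.range_add, List.range_succ,
      List.filter_append, List.filter_append, List.filter_map,
      List.filter_eq_self.mpr (by intro a ha; rw [List.mem_range] at ha; simp; omega)]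
  have h2 : List.filter ((fun j => j != i) ∘ fun x => i + 1 + x) (List.range m)
      = List.range m := List.filter_eq_self.mpr (by intro a _; simp; omega)
  rw [h2]
  simp

-- skipping index i and mapping back through the list = take/drop concatenation
theorem filtered_map_eq_slices (ns : List String) (i : Nat) (hi : i < ns.length) :
    ((List.range ns.length).filter (fun j => j != i)).map
        (fun (j : Nat) => (PySem.List.pyGetD ns (j : Int) "", (1 : Int)))
      = (ns.map (fun name => (name, (1 : Int)))).take i
        ++ (ns.map (fun name => (name, (1 : Int)))).drop (i + 1) := by
  rw [range_filter_ne ns.length i hi, List.map_append, List.map_map]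
  congr 1
  · apply List.ext_getElem
    · simp; omega
    · intro k h1 h2
      simp at h1
      simp [PySem.List.pyGetD_natCast, List.getD_eq_getElem?_getD,
            List.getElem?_eq_getElem (by omega : k < ns.length)]
  · apply List.ext_getElem
    · simp; omega
    · intro k h1 h2
      simp at h1
      simp [Function.comp, PySem.List.pyGetD_natCast, List.getD_eq_getElem?_getD,
            List.getElem?_eq_getElem (by omega : i + 1 + k < ns.length)]

-- B's foldl with the prefix/suffix invariant produces buildRec
theorem foldl_march (ns pre : List String) (res : List (String × List (String × Int))) :
    ns.foldl
      (fun (st : List (String × Int) × List (String × Int) × List (String × (List (String × Int)))) name =>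
        let after := st.2.1.drop 1
        (st.1 ++ [(name, (1 : Int))], after, st.2.2 ++ [(name, st.1 ++ after)]))
      (pre.map (fun n => (n, (1 : Int))), ns.map (fun n => (n, (1 : Int))), res)
      = ((pre ++ ns).map (fun n => (n, (1 : Int))), [],
         res ++ buildRec (pre.map (fun n => (n, (1 : Int)))) ns) := by
  induction ns generalizing pre res with
  | nil => simp [buildRec]
  | cons n tail ih =>
    simp only [List.foldl_cons, List.map_cons, List.drop_succ_cons, List.drop_zero]
    have h := ih (pre ++ [n]) (res ++ [(n, pre.map (fun n => (n, (1 : Int))) ++ tail.map (fun n => (n, (1 : Int))))])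
    simp only [List.map_append, List.map_cons, List.map_nil] at h ⊢
    rw [h]
    simp [buildRec]

-- buildRec = A's per-index description
theorem buildRec_eq (ns pre : List String) :
    buildRec (pre.map (fun n => (n, (1 : Int)))) ns
      = (List.range ns.length).map (fun (k : Nat) =>
          (PySem.List.pyGetD ns (k : Int) "",
           pre.map (fun n => (n, (1 : Int)))
             ++ (ns.map (fun n => (n, (1 : Int)))).take k
             ++ (ns.map (fun n => (n, (1 : Int)))).drop (k + 1))) := by
  induction ns generalizing pre with
  | nil => simp [buildRec]
  | cons n tail ih =>
    rw [List.length_cons, List.range_succ_eq_map, List.map_cons, List.map_map]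
    have h := ih (pre ++ [n])
    simp only [List.map_append, List.map_cons, List.map_nil] at h
    unfold buildRec
    refine congrArg₂ _ ?_ ?_
    · simp [PySem.List.pyGetD]
    · rw [h]
      apply List.map_congr_left
      intro k _
      refine congrArg₂ _ ?_ ?_
      · have : (((k + 1 : Nat)) : Int) = ((k : Nat) : Int) + 1 := by push_cast; ring
        simp [PySem.List.pyGetD_natCast, this]
        rw [show ((k : Nat) : Int) + 1 = (((k + 1 : Nat)) : Int) by push_cast; ring,
            PySem.List.pyGetD_natCast]
        simp [List.getD_eq_getElem?_getD]
      · simp [List.take_succ_cons, List.drop_succ_cons]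

-- ===== VERDICT (by name: the statement is the Claim_ definition above) =====
theorem gen_coauthor_batch_spec : Claim_equal_gen_coauthor_batch := by
  intro l _ _
  show gen_coauthor_batch l = gen_coauthor_batch_alt l
  unfold gen_coauthor_batch gen_coauthor_batch_alt
  rw [foldl_names]
  set ns := l.map (fun inventor => pyGetName (pyNameVal inventor)) with hns
  simp only [List.nil_append]
  rw [foldl_outer]
  have hm : ns.foldl
      (fun (st : List (String × Int) × List (String × Int) × List (String × (List (String × Int)))) name =>
        let after := st.2.1.drop 1
        (st.1 ++ [(name, (1 : Int))], after, st.2.2 ++ [(name, st.1 ++ after)]))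
      ([], ns.map (fun n => (n, (1 : Int))), [])
      = ((([] : List String) ++ ns).map (fun n => (n, (1 : Int))), [],
         [] ++ buildRec (([] : List String).map (fun n => (n, (1 : Int)))) ns) :=
    foldl_march ns [] []
  rw [hm]
  refine Prod.ext rfl ?_
  simp only [List.nil_append, List.map_nil]
  have hb := buildRec_eq ns []
  simp only [List.map_nil, List.nil_append] at hb
  rw [hb]
  apply List.map_congr_left
  intro i hi
  rw [List.mem_range] at hi
  refine congrArg₂ _ rfl ?_
  rw [foldl_inner]
  simp only [List.nil_append]
  exact filtered_map_eq_slices ns i hi
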